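-- pv_equiv track=rewrite | github.com/adityanandanx/possibly-prophet-2 | backend/agents/learning_objectives_agent.py | _is_verb_content_type_compatible
-- ===== SOURCE A (Python) =====
-- def _is_verb_content_type_compatible(verb: str, content: str) -> bool:
--     """Check if a verb is compatible with content type"""
--     # Define verb-content type compatibility
--     if verb in ['define', 'identify', 'list'] and 'definition' in content:
--         return True
--     elif verb in ['explain', 'describe', 'interpret'] and any(word in content for word in ['concept', 'theory', 'principle']):
--         return True
--     elif verb in ['apply', 'use', 'implement'] and any(word in content for word in ['method', 'procedure', 'technique']):
--         return True
--     elif verb in ['analyze', 'examine', 'compare'] and any(word in content for word in ['analysis', 'comparison', 'relationship']):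
--         return True
--     elif verb in ['evaluate', 'assess', 'critique'] and any(word in content for word in ['evaluation', 'assessment', 'quality']):
--         return True
--     elif verb in ['create', 'design', 'develop'] and any(word in content for word in ['creation', 'design', 'development']):
--         return True
--
--     return False
-- ===== SOURCE B (Python) =====
-- # Inverted index / staged passes: first scan the content for ALL keywords and collect the
-- # triggered group ids; then a single verb->group lookup decides membership in that set.
-- _VERB_GROUP = {
--     'define': 0, 'identify': 0, 'list': 0,
--     'explain': 1, 'describe': 1, 'interpret': 1,
--     'apply': 2, 'use': 2, 'implement': 2,
--     'analyze': 3, 'examine': 3, 'compare': 3,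
--     'evaluate': 4, 'assess': 4, 'critique': 4,
--     'create': 5, 'design': 5, 'develop': 5,
-- }
-- _KEYWORD_GROUP = [
--     ('definition', 0),
--     ('concept', 1), ('theory', 1), ('principle', 1),
--     ('method', 2), ('procedure', 2), ('technique', 2),
--     ('analysis', 3), ('comparison', 3), ('relationship', 3),
--     ('evaluation', 4), ('assessment', 4), ('quality', 4),
--     ('creation', 5), ('design', 5), ('development', 5),
-- ]
--
-- def _is_verb_content_type_compatible(verb: str, content: str) -> bool:
--     triggered = {g for kw, g in _KEYWORD_GROUP if kw in content}
--     return _VERB_GROUP.get(verb) in triggered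
-- ===== Notes on version B (the rewrite author's own statement) =====
-- stated objective: alternative
-- what changed: Inverted the control flow: instead of A's verb-first if/elif cascade that tests the verb's group and then its keywords, B first scans the content once for all 16 keywords building the set of triggered group ids, then answers with a single verb-to-group-id lookup and set membership test; correct because the verb groups are disjoint.
import Mathlib
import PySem

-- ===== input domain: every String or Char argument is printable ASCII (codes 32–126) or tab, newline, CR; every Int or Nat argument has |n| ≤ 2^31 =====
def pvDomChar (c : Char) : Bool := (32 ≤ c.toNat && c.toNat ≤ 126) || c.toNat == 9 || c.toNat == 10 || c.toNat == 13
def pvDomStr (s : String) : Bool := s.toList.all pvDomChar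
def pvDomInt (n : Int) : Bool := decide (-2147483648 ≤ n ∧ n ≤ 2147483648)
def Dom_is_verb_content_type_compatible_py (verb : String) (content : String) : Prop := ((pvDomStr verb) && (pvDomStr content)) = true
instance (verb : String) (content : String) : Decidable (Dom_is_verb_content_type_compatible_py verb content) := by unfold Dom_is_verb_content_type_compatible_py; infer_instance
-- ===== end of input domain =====

-- B inverts A's control flow: one content scan collects the triggered keyword-group ids, then a single verb->group lookup decides (objective: alternative).


-- ===== PORT A =====
def is_verb_content_type_compatible_py (verb : String) (content : String) : Bool :=
  if ["define", "identify", "list"].contains verb && PySem.Str.isIn "definition" content then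
    true
  else if ["explain", "describe", "interpret"].contains verb &&
      ["concept", "theory", "principle"].any (fun word => PySem.Str.isIn word content) then
    true
  else if ["apply", "use", "implement"].contains verb &&
      ["method", "procedure", "technique"].any (fun word => PySem.Str.isIn word content) then
    true
  else if ["analyze", "examine", "compare"].contains verb &&
      ["analysis", "comparison", "relationship"].any (fun word => PySem.Str.isIn word content) then
    true
  else if ["evaluate", "assess", "critique"].contains verb &&
      ["evaluation", "assessment", "quality"].any (fun word => PySem.Str.isIn word content) then
    true
  else if ["create", "design", "develop"].contains verb &&
      ["creation", "design", "development"].any (fun word => PySem.Str.isIn word content) then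
    true
  else
    false

-- ===== PORT B =====
-- Source B's module constants: the verb -> group-id dict and the (keyword, group-id) list
def pvVerbGroup : PySem.Dict String Int :=
  PySem.Dict.ofList
  [("define", 0), ("identify", 0), ("list", 0),
   ("explain", 1), ("describe", 1), ("interpret", 1),
   ("apply", 2), ("use", 2), ("implement", 2),
   ("analyze", 3), ("examine", 3), ("compare", 3),
   ("evaluate", 4), ("assess", 4), ("critique", 4),
   ("create", 5), ("design", 5), ("develop", 5)]

def pvKeywordGroup : List (String × Int) :=
  [("definition", 0),
   ("concept", 1), ("theory", 1), ("principle", 1),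
   ("method", 2), ("procedure", 2), ("technique", 2),
   ("analysis", 3), ("comparison", 3), ("relationship", 3),
   ("evaluation", 4), ("assessment", 4), ("quality", 4),
   ("creation", 5), ("design", 5), ("development", 5)]

-- triggered = {g for kw, g in _KEYWORD_GROUP if kw in content}; return _VERB_GROUP.get(verb) in triggered
-- (Python's 'None in triggered' on a set of ints is always False: the none branch returns false)
def is_verb_content_type_compatible_py_alt (verb : String) (content : String) : Bool :=
  let triggered : PySem.Set Int :=
    PySem.Set.ofList ((pvKeywordGroup.filter (fun p => PySem.Str.isIn p.1 content)).map Prod.snd)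
  match PySem.Dict.get? pvVerbGroup verb with
  | none => false
  | some g => PySem.Set.contains triggered g

-- ===== PRECONDITION & SPEC =====
def Spec_is_verb_content_type_compatible_py (verb : String) (content : String) (out : Bool) : Prop := out = is_verb_content_type_compatible_py_alt verb content
instance (verb : String) (content : String) (out : Bool) : Decidable (Spec_is_verb_content_type_compatible_py verb content out) := by unfold Spec_is_verb_content_type_compatible_py; infer_instance

-- ===== CLAIM (what is proved, stated in full; the proofs are below) =====
def Claim_equal_is_verb_content_type_compatible_py : Prop := ∀ (verb : String) (content : String), Dom_is_verb_content_type_compatible_py verb content → Spec_is_verb_content_type_compatible_py verb content (is_verb_content_type_compatible_py verb content)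

-- ===== LEMMAS AND PROOFS =====
-- the verb dict as a literal Dict.mk, so get? can be evaluated by get?_mk_cons
theorem pv_verbGroup_mk : pvVerbGroup = PySem.Dict.mk
    [("define", 0), ("identify", 0), ("list", 0),
     ("explain", 1), ("describe", 1), ("interpret", 1),
     ("apply", 2), ("use", 2), ("implement", 2),
     ("analyze", 3), ("examine", 3), ("compare", 3),
     ("evaluate", 4), ("assess", 4), ("critique", 4),
     ("create", 5), ("design", 5), ("develop", 5)] := by decide

-- ===== VERDICT (by name: the statement is the Claim_ definition above) =====
theorem is_verb_content_type_compatible_py_spec : Claim_equal_is_verb_content_type_compatible_py := by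
  intro verb content _
  unfold Spec_is_verb_content_type_compatible_py
  by_cases hv : verb ∈ (["define", "identify", "list", "explain", "describe", "interpret",
      "apply", "use", "implement", "analyze", "examine", "compare",
      "evaluate", "assess", "critique", "create", "design", "develop"] : List String)
  · simp only [List.mem_cons, List.not_mem_nil, or_false] at hv
    rcases hv with rfl|rfl|rfl|rfl|rfl|rfl|rfl|rfl|rfl|rfl|rfl|rfl|rfl|rfl|rfl|rfl|rfl|rfl <;>
      simp [is_verb_content_type_compatible_py, is_verb_content_type_compatible_py_alt,
        pv_verbGroup_mk, PySem.Dict.get?_mk_cons, pvKeywordGroup]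
  · simp only [List.mem_cons, List.not_mem_nil, or_false, not_or] at hv
    obtain ⟨n1,n2,n3,n4,n5,n6,n7,n8,n9,n10,n11,n12,n13,n14,n15,n16,n17,n18⟩ := hv
    have hg : PySem.Dict.get? pvVerbGroup verb = none := by
      simp [pv_verbGroup_mk, PySem.Dict.get?,
        beq_eq_false_iff_ne.mpr (Ne.symm n1), beq_eq_false_iff_ne.mpr (Ne.symm n2),
        beq_eq_false_iff_ne.mpr (Ne.symm n3), beq_eq_false_iff_ne.mpr (Ne.symm n4),
        beq_eq_false_iff_ne.mpr (Ne.symm n5), beq_eq_false_iff_ne.mpr (Ne.symm n6),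
        beq_eq_false_iff_ne.mpr (Ne.symm n7), beq_eq_false_iff_ne.mpr (Ne.symm n8),
        beq_eq_false_iff_ne.mpr (Ne.symm n9), beq_eq_false_iff_ne.mpr (Ne.symm n10),
        beq_eq_false_iff_ne.mpr (Ne.symm n11), beq_eq_false_iff_ne.mpr (Ne.symm n12),
        beq_eq_false_iff_ne.mpr (Ne.symm n13), beq_eq_false_iff_ne.mpr (Ne.symm n14),
        beq_eq_false_iff_ne.mpr (Ne.symm n15), beq_eq_false_iff_ne.mpr (Ne.symm n16),
        beq_eq_false_iff_ne.mpr (Ne.symm n17), beq_eq_false_iff_ne.mpr (Ne.symm n18)]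
    simp [is_verb_content_type_compatible_py, is_verb_content_type_compatible_py_alt, hg,
      n1,n2,n3,n4,n5,n6,n7,n8,n9,n10,n11,n12,n13,n14,n15,n16,n17,n18]
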